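-- pv_equiv track=rewrite | github.com/ariguz06/lab | src/graph.py | build_ancestors
-- ===== SOURCE A (Python) =====
-- def build_ancestors(bags, parent):
--     anc = {}
--
--     def helper(v):
--         if v in anc:
--             return anc[v]
--         if parent[v] is None:
--             anc[v] = [v]
--         else:
--             anc[v] = helper(parent[v]) + [v]
--         return anc[v]
--
--     for v in bags:
--         helper(v)
--
--     return anc
-- ===== SOURCE B (Python) =====
-- def build_ancestors(bags, parent):
--     # Iterative: walk up via parent[] collecting uncached nodes on a stack,
--     # then assign paths top-down; same anc entries and insertion order as A.
--     anc = {}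
--     for v in bags:
--         stack = []
--         cur = v
--         while cur is not None and cur not in anc:
--             stack.append(cur)
--             cur = parent[cur]
--         base = [] if cur is None else anc[cur]
--         for node in reversed(stack):
--             base = base + [node]
--             anc[node] = base
--     return anc
-- ===== Notes on version B (the rewrite author's own statement) =====
-- stated objective: alternative
-- what changed: Replaces A's memoized recursive helper with an iterative per-bag algorithm: walk up the parent chain pushing uncached nodes on an explicit stack, then pop it assigning fresh root-to-node path lists top-down; same entries and insertion order, no recursion.
import Mathlib
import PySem

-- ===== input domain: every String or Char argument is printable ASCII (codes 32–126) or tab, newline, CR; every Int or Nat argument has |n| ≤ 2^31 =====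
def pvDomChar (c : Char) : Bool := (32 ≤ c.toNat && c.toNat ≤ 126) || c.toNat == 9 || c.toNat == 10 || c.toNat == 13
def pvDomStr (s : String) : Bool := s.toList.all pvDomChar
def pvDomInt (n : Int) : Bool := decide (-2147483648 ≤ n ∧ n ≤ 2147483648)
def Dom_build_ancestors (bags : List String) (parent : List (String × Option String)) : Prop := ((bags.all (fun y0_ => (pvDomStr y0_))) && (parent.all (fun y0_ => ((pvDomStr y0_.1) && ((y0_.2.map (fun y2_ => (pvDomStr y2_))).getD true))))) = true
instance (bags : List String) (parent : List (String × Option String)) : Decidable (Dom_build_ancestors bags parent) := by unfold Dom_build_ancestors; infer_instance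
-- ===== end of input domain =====

-- B replaces A's memoized recursion by an explicit-stack iteration (same anc entries, same insertion order); objective: alternative decomposition.


-- ===== PORT A =====
-- A's recursive helper: fuel-bounded recursion; `none` = Python raising
-- (KeyError on a missing parent key, or RecursionError/non-termination on a cycle).
def helperA (parent : PySem.Dict String (Option String)) :
    Nat → PySem.Dict String (List String) → String →
    Option (PySem.Dict String (List String) × List String)
  | 0, _, _ => none
  | n+1, anc, v =>
    match anc.get? v with
    | some l => some (anc, l)
    | none =>
      match parent.get? v with
      | none => none
      | some none => some (anc.insert v [v], [v])
      | some (some p) =>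
        match helperA parent n anc p with
        | none => none
        | some (anc', l) => some (anc'.insert v (l ++ [v]), l ++ [v])

def build_ancestors (bags : List String) (parent : List (String × Option String)) :
    List (String × List String) :=
  let pd := PySem.Dict.mk parent
  match bags.foldl
      (fun st v => match st with
        | none => none
        | some anc => (helperA pd (parent.length + 1) anc v).map Prod.fst)
      (some PySem.Dict.empty) with
  | none => []
  | some anc => anc.items

-- ===== PORT B =====
-- B's upward walk: collect uncached nodes (deepest ancestor at the head), stop at a
-- cached node (`some c`) or at a None-parent (`none`); `none` result = Python raising.
def climbB (parent : PySem.Dict String (Option String))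
    (anc : PySem.Dict String (List String)) :
    Nat → String → List String → Option (List String × Option String)
  | 0, _, _ => none
  | n+1, cur, stack =>
    if (anc.get? cur).isSome then some (stack, some cur)
    else
      match parent.get? cur with
      | none => none
      | some none => some (cur :: stack, none)
      | some (some p) => climbB parent anc n p (cur :: stack)

-- B's per-bag step: walk up, compute the base path, then assign paths top-down.
def stepB (parent : PySem.Dict String (Option String)) (fuel : Nat)
    (anc : PySem.Dict String (List String)) (v : String) :
    Option (PySem.Dict String (List String) × List String) :=
  match climbB parent anc fuel v [] with
  | none => none
  | some (st, stop) =>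
    let base : List String := match stop with
      | none => []
      | some c => (anc.get? c).getD []
    some (st.foldl (fun ab node => (ab.1.insert node (ab.2 ++ [node]), ab.2 ++ [node]))
      (anc, base))

def build_ancestors_alt (bags : List String) (parent : List (String × Option String)) :
    List (String × List String) :=
  let pd := PySem.Dict.mk parent
  match bags.foldl
      (fun st v => match st with
        | none => none
        | some anc => (stepB pd (parent.length + 1) anc v).map Prod.fst)
      (some PySem.Dict.empty) with
  | none => []
  | some anc => anc.items

-- ===== PRECONDITION & SPEC =====
-- chainOk is a shape condition on the INPUT parent map (not a copy of either port,
-- which thread a memo dict and build path lists): "v has a rooted parent chain", i.e.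
-- the chain from v stays inside parent's keys and reaches a None parent. The bound
-- parent.length+1 is not a size cap: a rooted chain has distinct keys, so any chain
-- that exists fits under it, and chainOk is independent of the bound beyond that.
def chainOk (parent : PySem.Dict String (Option String)) : Nat → String → Bool
  | 0, _ => false
  | n+1, v =>
    match parent.get? v with
    | none => false
    | some none => true
    | some (some p) => chainOk parent n p

-- Pre_ excludes exactly the inputs on which Python A raises: a KeyError (some node on
-- a bag's parent chain is not a key of parent) or unbounded recursion (a cycle).
def Pre_build_ancestors (bags : List String) (parent : List (String × Option String)) : Prop :=
  ∀ v ∈ bags, chainOk (PySem.Dict.mk parent) (parent.length + 1) v = true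
instance (bags : List String) (parent : List (String × Option String)) : Decidable (Pre_build_ancestors bags parent) := by unfold Pre_build_ancestors; infer_instance

def pvWitness_build_ancestors : List String × (List (String × Option String)) :=
  (["b", "c"], [("a", none), ("b", some "a"), ("c", some "b")])

def Spec_build_ancestors (bags : List String) (parent : List (String × Option String)) (out : List (String × List String)) : Prop := out = build_ancestors_alt bags parent
instance (bags : List String) (parent : List (String × Option String)) (out : List (String × List String)) : Decidable (Spec_build_ancestors bags parent out) := by unfold Spec_build_ancestors; infer_instance

-- ===== CLAIM (what is proved, stated in full; the proofs are below) =====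
def Claim_equal_build_ancestors : Prop := ∀ (bags : List String) (parent : List (String × Option String)), Dom_build_ancestors bags parent → Pre_build_ancestors bags parent → Spec_build_ancestors bags parent (build_ancestors bags parent)

-- ===== LEMMAS AND PROOFS =====

-- The stack accumulator of climbB is an append: climbing with stack s appends s.
theorem climbB_append (parent : PySem.Dict String (Option String))
    (anc : PySem.Dict String (List String)) :
    ∀ (n : Nat) (cur : String) (s : List String),
      climbB parent anc n cur s =
        (climbB parent anc n cur []).map (fun r => (r.1 ++ s, r.2)) := by
  intro n
  induction n with
  | zero => intro cur s; simp [climbB]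
  | succ n ih =>
    intro cur s
    simp only [climbB]
    by_cases h : (anc.get? cur).isSome
    · simp [h]
    · simp only [h, if_neg, Bool.false_eq_true, not_false_eq_true]
      match hp : parent.get? cur with
      | none => simp
      | some none => simp
      | some (some p) =>
        simp only []
        rw [ih p (cur :: s), ih p [cur]]
        cases climbB parent anc n p [] <;> simp

-- Per-bag agreement: B's walk-then-assign step computes exactly A's memoized recursion.
theorem stepB_eq_helperA (parent : PySem.Dict String (Option String)) :
    ∀ (n : Nat) (anc : PySem.Dict String (List String)) (v : String),
      stepB parent n anc v = helperA parent n anc v := by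
  intro n
  induction n with
  | zero => intro anc v; simp [stepB, climbB, helperA]
  | succ n ih =>
    intro anc v
    simp only [stepB, climbB, helperA]
    match ha : anc.get? v with
    | some l => simp [ha]
    | none =>
      simp only [Option.isSome_none, Bool.false_eq_true, if_false]
      match hp : parent.get? v with
      | none => simp
      | some none => simp
      | some (some p) =>
        simp only []
        rw [climbB_append parent anc n p [v]]
        have hih := ih anc p
        match hA : helperA parent n anc p with
        | none =>
          -- then stepB n anc p = none, so climbB … = none
          rw [hA] at hih
          simp only [stepB] at hih
          match hc : climbB parent anc n p [] with
          | none => simp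
          | some r => rw [hc] at hih; simp at hih
        | some r =>
          rw [hA] at hih
          simp only [stepB] at hih
          match hc : climbB parent anc n p [] with
          | none => rw [hc] at hih; simp at hih
          | some st =>
            rw [hc] at hih
            simp only [Option.some.injEq] at hih
            simp only [Option.map_some]
            rw [List.foldl_append]
            rw [hih]
            simp

-- ===== VERDICT (by name: the statement is the Claim_ definition above) =====
theorem build_ancestors_spec : Claim_equal_build_ancestors := by
  intro bags parent _ _
  unfold Spec_build_ancestors build_ancestors build_ancestors_alt
  simp only [stepB_eq_helperA]
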